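-- pv_equiv track=rewrite | github.com/Ssunbell/Algorithm_Study | 36주차/PRO_외벽점검/PRO_외벽점검_이나현.py | get_section_sum
-- ===== SOURCE A (Python) =====
-- def get_section_sum(arr, start) -> list:
--     section_sum = []
--     idx = start
--     tmp_sum = 0
--     for _ in range(len(arr)+1):
--         tmp_sum += arr[idx]
--         if arr[idx] == 0:
--             section_sum.append(tmp_sum)
--             tmp_sum = 0
--         idx = (idx + 1) % len(arr)
--     return sorted(section_sum, reverse=True)
-- ===== SOURCE B (Python) =====
-- def get_section_sum(arr, start) -> list:
--     n = len(arr)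
--     rotated = [arr[(start + i) % n] for i in range(n + 1)]
--     prefix = [0]
--     s = 0
--     for x in rotated:
--         s += x
--         prefix.append(s)
--     sums = []
--     last = 0
--     for i in range(len(rotated)):
--         if rotated[i] == 0:
--             sums.append(prefix[i + 1] - prefix[last])
--             last = i + 1
--     return sorted(sums, reverse=True)
-- ===== Notes on version B (the rewrite author's own statement) =====
-- stated objective: alternative
-- what changed: Replaces A's single stateful loop (modular index, running segment sum reset at zeros) by building the rotated window explicitly, a prefix-sum table over it, and computing each segment sum as a difference of two prefix values at the zero positions.
-- crash fix: For start outside [-len(arr), len(arr)) with arr nonempty, A raises IndexError on its first unreduced access arr[start], while B's modular rotation returns the same segment sums as for start % len(arr). — e.g. on get_section_sum([1, 0], 5): A raises IndexError, B returns [1, 0]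
import Mathlib
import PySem

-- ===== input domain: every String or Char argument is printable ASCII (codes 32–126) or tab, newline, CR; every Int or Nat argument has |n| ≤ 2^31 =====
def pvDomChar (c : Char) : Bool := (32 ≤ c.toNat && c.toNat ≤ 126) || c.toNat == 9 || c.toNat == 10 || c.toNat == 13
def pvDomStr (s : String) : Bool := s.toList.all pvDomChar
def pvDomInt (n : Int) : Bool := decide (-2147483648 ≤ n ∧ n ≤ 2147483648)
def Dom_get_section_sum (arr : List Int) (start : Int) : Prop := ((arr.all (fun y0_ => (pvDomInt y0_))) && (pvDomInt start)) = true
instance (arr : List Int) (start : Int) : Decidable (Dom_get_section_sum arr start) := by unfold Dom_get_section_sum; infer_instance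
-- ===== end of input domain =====

-- B replaces A's single stateful loop (modular index, running segment sum reset at zeros) by an
-- explicit rotated window, a prefix-sum table and prefix differences at the zero positions
-- (objective: alternative decomposition, same cost).

-- ===== PORT A =====
-- literal port of A's loop: state (idx, tmp_sum, section_sum); Pre_ keeps every arr[idx] in
-- range, so the `.getD 0` default of pyGet? is never taken on admitted inputs.
def get_section_sum (arr : List Int) (start : Int) : List Int :=
  let st := (PySem.List.pyRange 0 ((arr.length : Int) + 1) 1).foldl
    (fun (st : Int × Int × List Int) _ =>
      let v := (PySem.List.pyGet? arr st.1).getD 0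
      let tmp := st.2.1 + v
      if v == 0 then
        (PySem.Int.mod (st.1 + 1) (arr.length : Int), 0, st.2.2 ++ [tmp])
      else
        (PySem.Int.mod (st.1 + 1) (arr.length : Int), tmp, st.2.2))
    (start, 0, [])
  PySem.List.sorted st.2.2 (fun x => x) true

-- ===== PORT B =====
-- literal port of Source B: rotated window, prefix-sum table, prefix differences at the zeros.
def get_section_sum_alt (arr : List Int) (start : Int) : List Int :=
  let n : Int := arr.length
  let rotated := (PySem.List.pyRange 0 (n + 1) 1).map
    (fun i => (PySem.List.pyGet? arr (PySem.Int.mod (start + i) n)).getD 0)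
  let pre := (rotated.foldl (fun (p : Int × List Int) x => (p.1 + x, p.2 ++ [p.1 + x])) (0, [0])).2
  let res := (PySem.List.pyRange 0 (rotated.length : Int) 1).foldl
    (fun (st : Int × List Int) i =>
      if (PySem.List.pyGet? rotated i).getD 0 == 0 then
        (i + 1, st.2 ++ [(PySem.List.pyGet? pre (i + 1)).getD 0 - (PySem.List.pyGet? pre st.1).getD 0])
      else st)
    (0, [])
  PySem.List.sorted res.2 (fun x => x) true

-- ===== PRECONDITION & SPEC =====
-- exactly the inputs on which A returns: arr nonempty and start a valid Python index into arr
def Pre_get_section_sum (arr : List Int) (start : Int) : Prop :=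
  arr ≠ [] ∧ -(arr.length : Int) ≤ start ∧ start < (arr.length : Int)
instance (arr : List Int) (start : Int) : Decidable (Pre_get_section_sum arr start) := by
  unfold Pre_get_section_sum; infer_instance
def pvWitness_get_section_sum : List Int × Int := ([2, 0, 1, 0, 3], -2)

-- For start outside [-len(arr), len(arr)) with arr nonempty, A raises IndexError on its first
-- unreduced access arr[start], while B's modular rotation returns the segment sums for
-- start % len(arr).
def Raises_get_section_sum (arr : List Int) (start : Int) : Prop :=
  arr ≠ [] ∧ (start < -(arr.length : Int) ∨ (arr.length : Int) ≤ start)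
instance (arr : List Int) (start : Int) : Decidable (Raises_get_section_sum arr start) := by
  unfold Raises_get_section_sum; infer_instance
def pvRaiseWitness_get_section_sum : List Int × Int := ([1, 0], 5)
def pvRaiseWitnessOut_get_section_sum : List Int := [1, 0]

def Spec_get_section_sum (arr : List Int) (start : Int) (out : List Int) : Prop :=
  out = get_section_sum_alt arr start
instance (arr : List Int) (start : Int) (out : List Int) : Decidable (Spec_get_section_sum arr start out) := by
  unfold Spec_get_section_sum; infer_instance

-- ===== CLAIM (what is proved, stated in full; the proofs are below) =====
def Claim_equal_get_section_sum : Prop := ∀ (arr : List Int) (start : Int), Dom_get_section_sum arr start → Pre_get_section_sum arr start → Spec_get_section_sum arr start (get_section_sum arr start)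
def Claim_raises_get_section_sum : Prop := (∀ (arr : List Int) (start : Int), Dom_get_section_sum arr start → Raises_get_section_sum arr start → ¬ Pre_get_section_sum arr start) ∧ (Dom_get_section_sum (pvRaiseWitness_get_section_sum.1) (pvRaiseWitness_get_section_sum.2) ∧ Raises_get_section_sum (pvRaiseWitness_get_section_sum.1) (pvRaiseWitness_get_section_sum.2) ∧ get_section_sum_alt (pvRaiseWitness_get_section_sum.1) (pvRaiseWitness_get_section_sum.2) = pvRaiseWitnessOut_get_section_sum)

-- ===== LEMMAS AND PROOFS =====

def segLoop : List Int → Int → List Int → List Int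
  | [], _, acc => acc
  | x :: xs, tmp, acc =>
    if x = 0 then segLoop xs 0 (acc ++ [tmp + x]) else segLoop xs (tmp + x) acc

theorem pyGet?_mod_self (arr : List Int) (j : Int) (h1 : -(arr.length : Int) ≤ j)
    (h2 : j < (arr.length : Int)) (h0 : 0 < (arr.length : Int)) :
    PySem.List.pyGet? arr j = PySem.List.pyGet? arr (PySem.Int.mod j (arr.length : Int)) := by
  rw [PySem.Int.mod_eq_emod_of_pos h0]
  rcases le_or_gt 0 j with hj | hj
  · rw [Int.emod_eq_of_lt hj h2]
  · have he : j % (arr.length : Int) = j + arr.length := by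
      have h3 : j % (arr.length : Int) = (j + (arr.length : Int) * 1) % (arr.length : Int) :=
        (Int.add_mul_emod_self_left j (arr.length : Int) 1).symm
      rw [h3, mul_one, Int.emod_eq_of_lt (by omega) (by omega)]
    rw [he]
    simp only [PySem.List.pyGet?, PySem.List.pyIdx?]
    rw [if_neg (by omega), if_pos (by omega), if_pos (by omega), if_pos (by omega)]
    congr 2
    omega



def rotFn (arr : List Int) (j : Int) (k : Nat) : Int :=
  (PySem.List.pyGet? arr (PySem.Int.mod (j + (k : Int)) (arr.length : Int))).getD 0

theorem loopA (arr : List Int) (m : Nat) :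
    ∀ (c j tmp : Int) (acc : List Int),
    -(arr.length : Int) ≤ j → j < (arr.length : Int) →
    ((PySem.List.pyRange c (c + (m : Int)) 1).foldl
      (fun (st : Int × Int × List Int) _ =>
        let v := (PySem.List.pyGet? arr st.1).getD 0
        let tmp := st.2.1 + v
        if v == 0 then
          (PySem.Int.mod (st.1 + 1) (arr.length : Int), 0, st.2.2 ++ [tmp])
        else
          (PySem.Int.mod (st.1 + 1) (arr.length : Int), tmp, st.2.2))
      (j, tmp, acc)).2.2
    = segLoop ((List.range m).map (rotFn arr j)) tmp acc := by
  induction m with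
  | zero =>
    intro c j tmp acc _ _
    have h : PySem.List.pyRange c (c + ((0 : Nat) : Int)) 1 = [] := by
      rw [PySem.List.pyRange_one]
      simp
    rw [h]
    simp [segLoop]
  | succ m ih =>
    intro c j tmp acc h1 h2
    have h0 : 0 < (arr.length : Int) := by omega
    have hcons : PySem.List.pyRange c (c + ((m + 1 : Nat) : Int)) 1
        = c :: PySem.List.pyRange (c + 1) ((c + 1) + (m : Int)) 1 := by
      have hb : c + ((m + 1 : Nat) : Int) = (c + 1) + (m : Int) := by push_cast; omega
      rw [hb, PySem.List.pyRange_one_cons (by omega)]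
    rw [hcons, List.foldl_cons, List.range_succ_eq_map, List.map_cons, List.map_map]
    have hv0 : rotFn arr j 0 = (PySem.List.pyGet? arr j).getD 0 := by
      unfold rotFn
      rw [Nat.cast_zero, add_zero, ← pyGet?_mod_self arr j h1 h2 h0]
    have hmodb : -(arr.length : Int) ≤ PySem.Int.mod (j + 1) (arr.length : Int)
        ∧ PySem.Int.mod (j + 1) (arr.length : Int) < (arr.length : Int) := by
      constructor
      · have := PySem.Int.mod_nonneg (j + 1) h0
        omega
      · exact PySem.Int.mod_lt (j + 1) h0
    have hmap : (rotFn arr j ∘ Nat.succ) = rotFn arr (PySem.Int.mod (j + 1) (arr.length : Int)) := by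
      funext k
      have hidx : PySem.Int.mod (j + ((k.succ : Nat) : Int)) (arr.length : Int)
          = PySem.Int.mod (PySem.Int.mod (j + 1) (arr.length : Int) + (k : Int)) (arr.length : Int) := by
        rw [PySem.Int.mod_eq_emod_of_pos h0, PySem.Int.mod_eq_emod_of_pos h0,
            PySem.Int.mod_eq_emod_of_pos h0, Int.emod_add_emod]
        congr 1
        push_cast
        omega
      simp only [rotFn, Function.comp]
      rw [hidx]
    simp only
    by_cases hz : (PySem.List.pyGet? arr j).getD 0 = 0
    · rw [if_pos (by simpa using hz)]
      rw [ih (c + 1) _ 0 (acc ++ [tmp + (PySem.List.pyGet? arr j).getD 0]) hmodb.1 hmodb.2]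
      rw [hmap, hv0, segLoop, if_pos hz]
    · rw [if_neg (by simpa using hz)]
      rw [ih (c + 1) _ (tmp + (PySem.List.pyGet? arr j).getD 0) acc hmodb.1 hmodb.2]
      rw [hmap, hv0, segLoop, if_neg hz]

theorem prefix_fold (xs : List Int) :
    ∀ (s : Int) (acc : List Int),
    (xs.foldl (fun (p : Int × List Int) x => (p.1 + x, p.2 ++ [p.1 + x])) (s, acc)).2
    = acc ++ (List.range xs.length).map (fun (k : Nat) => s + (xs.take (k + 1)).sum) := by
  induction xs with
  | nil => intro s acc; simp
  | cons x xs ih =>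
    intro s acc
    simp only [List.foldl_cons]
    rw [ih (s + x) (acc ++ [s + x])]
    rw [List.length_cons, List.range_succ_eq_map, List.map_cons, List.map_map]
    simp only [List.take_succ_cons, List.sum_cons, List.append_assoc, List.singleton_append,
      List.take_zero, List.sum_nil, add_zero]
    congr 1
    congr 1
    apply List.map_congr_left
    intro k _
    simp only [Function.comp_apply]
    ring

theorem pre_get (xs : List Int) (i : Nat) (hi : i ≤ xs.length) :
    (PySem.List.pyGet?
      ((xs.foldl (fun (p : Int × List Int) x => (p.1 + x, p.2 ++ [p.1 + x])) (0, [0])).2)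
      (i : Int)).getD 0 = (xs.take i).sum := by
  rw [prefix_fold xs 0 [0]]
  rw [PySem.List.pyGet?_of_nonneg _ (by omega)]
  simp only [Int.toNat_natCast, List.singleton_append]
  cases i with
  | zero => simp
  | succ k =>
    rw [List.getElem?_cons_succ, List.getElem?_map, List.getElem?_range (by omega)]
    simp

theorem loopB (xs pre' : List Int)
    (hpre : ∀ i : Nat, i ≤ xs.length → (PySem.List.pyGet? pre' (i : Int)).getD 0 = (xs.take i).sum)
    (m : Nat) :
    ∀ (c ls : Nat) (sums : List Int), c + m = xs.length → ls ≤ c →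
    (((PySem.List.pyRange (c : Int) ((c : Int) + (m : Int)) 1).foldl
      (fun (st : Int × List Int) i =>
        if (PySem.List.pyGet? xs i).getD 0 == 0 then
          (i + 1, st.2 ++ [(PySem.List.pyGet? pre' (i + 1)).getD 0 - (PySem.List.pyGet? pre' st.1).getD 0])
        else st)
      ((ls : Int), sums)).2 : List Int)
    = segLoop (xs.drop c) ((xs.take c).sum - (xs.take ls).sum) sums := by
  induction m with
  | zero =>
    intro c ls sums hc hls
    have h : PySem.List.pyRange (c : Int) ((c : Int) + ((0 : Nat) : Int)) 1 = [] := by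
      rw [PySem.List.pyRange_one]
      simp
    rw [h]
    have hd : xs.drop c = [] := by
      apply List.drop_eq_nil_of_le
      omega
    rw [hd]
    simp [segLoop]
  | succ m ih =>
    intro c ls sums hc hls
    have hclen : c < xs.length := by omega
    have hb : (c : Int) + ((m + 1 : Nat) : Int) = ((c : Int) + 1) + (m : Int) := by
      push_cast; omega
    rw [hb, PySem.List.pyRange_one_cons (by omega), List.foldl_cons]
    have hx : (PySem.List.pyGet? xs (c : Int)).getD 0 = xs[c] := by
      rw [PySem.List.pyGet?_natCast, List.getElem?_eq_getElem hclen]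
      rfl
    have hdrop : xs.drop c = xs[c] :: xs.drop (c + 1) := List.drop_eq_getElem_cons hclen
    have hcast : ((c : Int) + 1) = ((c + 1 : Nat) : Int) := by push_cast; ring
    simp only
    by_cases hz : xs[c] = 0
    · rw [if_pos (by rw [hx, hz]; rfl)]
      have hstep : (PySem.List.pyGet? pre' ((c : Int) + 1)).getD 0 - (PySem.List.pyGet? pre' ((ls : Nat) : Int)).getD 0
          = (xs.take (c + 1)).sum - (xs.take ls).sum := by
        rw [hcast, hpre (c + 1) (by omega), hpre ls (by omega)]
      rw [hstep, hcast]
      rw [ih (c + 1) (c + 1) _ (by omega) (le_refl _)]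
      rw [hdrop, segLoop, if_pos hz]
      congr 1
      · rw [sub_self]
      · congr 2
        rw [List.sum_take_succ xs c hclen, hz]
        ring
    · rw [if_neg (by rw [hx]; simp [hz])]
      rw [hcast]
      rw [ih (c + 1) ls _ (by omega) (by omega)]
      rw [hdrop, segLoop, if_neg hz]
      congr 1
      rw [List.sum_take_succ xs c hclen]
      ring

theorem main (arr : List Int) (start : Int) (hne : arr ≠ [])
    (h1 : -(arr.length : Int) ≤ start) (h2 : start < (arr.length : Int)) :
    get_section_sum arr start = get_section_sum_alt arr start := by
  have hn : 0 < arr.length := List.length_pos_of_ne_nil hne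
  -- the rotated window as a map over List.range
  have hrot : (PySem.List.pyRange 0 ((arr.length : Int) + 1) 1).map
      (fun i => (PySem.List.pyGet? arr (PySem.Int.mod (start + i) (arr.length : Int))).getD 0)
      = (List.range (arr.length + 1)).map (rotFn arr start) := by
    rw [PySem.List.pyRange_one]
    rw [List.map_map]
    have hlen : ((arr.length : Int) + 1 - 0).toNat = arr.length + 1 := by omega
    rw [hlen]
    apply List.map_congr_left
    intro k _
    simp only [Function.comp_apply, zero_add, rotFn]
  set L : List Int := (List.range (arr.length + 1)).map (rotFn arr start) with hL
  -- A's side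
  have hA : get_section_sum arr start = PySem.List.sorted (segLoop L 0 []) (fun x => x) true := by
    unfold get_section_sum
    simp only
    congr 1
    have hb : ((arr.length : Int) + 1) = 0 + ((arr.length + 1 : Nat) : Int) := by push_cast; ring
    rw [hb]
    exact loopA arr (arr.length + 1) 0 start 0 [] h1 h2
  -- B's side
  have hB : get_section_sum_alt arr start = PySem.List.sorted (segLoop L 0 []) (fun x => x) true := by
    unfold get_section_sum_alt
    simp only
    rw [hrot]
    congr 1
    have hrl : (((List.range (arr.length + 1)).map (rotFn arr start)).length : Int)
        = ((0 : Nat) : Int) + ((arr.length + 1 : Nat) : Int) := by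
      simp
    rw [hrl]
    have := loopB L
      ((L.foldl (fun (p : Int × List Int) x => (p.1 + x, p.2 ++ [p.1 + x])) (0, [0])).2)
      (fun i hi => pre_get L i hi) (arr.length + 1) 0 0 []
      (by simp [hL]) (le_refl 0)
    simp only [Nat.cast_zero, List.drop_zero, List.take_zero, List.sum_nil, sub_self] at this
    exact this
  rw [hA, hB]

-- ===== VERDICT (by name: the statement is the Claim_ definition above) =====
theorem get_section_sum_spec : Claim_equal_get_section_sum := by
  unfold Claim_equal_get_section_sum
  intro arr start _ hpre
  obtain ⟨hne, h1, h2⟩ := hpre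
  unfold Spec_get_section_sum
  exact main arr start hne h1 h2

@[simp] theorem get_section_sum_raises : Claim_raises_get_section_sum := by
  unfold Claim_raises_get_section_sum
  constructor
  · intro arr start _ hr hp
    rcases hr with ⟨_, h⟩
    rcases hp with ⟨_, ha, hb⟩
    omega
  · refine ⟨by decide, by decide, by decide⟩
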